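-- pv_equiv track=rewrite | github.com/proteeti13/RSMI | generate_wikivote_triples.py | generate_triples
-- ===== SOURCE A (Python) =====
-- def generate_triples(adj):
--     triples = set()
--     for u, neighbors_u in adj.items():
--         for v in neighbors_u:
--             if v in adj:
--                 for w in adj[v]:
--                     triples.add((u, v, w))
--     return triples
-- ===== SOURCE B (Python) =====
-- def generate_triples(adj):
--     # Agenda machine: instead of three nested loops, one while-loop drains a
--     # LIFO work stack of tagged tasks ("node" tasks expand into "edge" tasks,
--     # "edge" tasks emit their triples), with a single final dedup.
--     out = []
--     stack = [("node", u) for u in reversed(list(adj))]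
--     while stack:
--         task = stack.pop()
--         if task[0] == "node":
--             u = task[1]
--             stack.extend(("edge", u, v) for v in reversed(adj[u]))
--         else:
--             _, u, v = task
--             if v in adj:
--                 out.extend((u, v, w) for w in adj[v])
--     return set(out)
-- ===== Notes on version B (the rewrite author's own statement) =====
-- stated objective: alternative
-- what changed: B replaces A's three nested for-loops by a single while-loop draining an explicit LIFO work stack of tagged tasks (node tasks expand into edge tasks, edge tasks emit triples), collecting into a list and deduplicating once at the end instead of incremental set insertion.
import Mathlib
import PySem

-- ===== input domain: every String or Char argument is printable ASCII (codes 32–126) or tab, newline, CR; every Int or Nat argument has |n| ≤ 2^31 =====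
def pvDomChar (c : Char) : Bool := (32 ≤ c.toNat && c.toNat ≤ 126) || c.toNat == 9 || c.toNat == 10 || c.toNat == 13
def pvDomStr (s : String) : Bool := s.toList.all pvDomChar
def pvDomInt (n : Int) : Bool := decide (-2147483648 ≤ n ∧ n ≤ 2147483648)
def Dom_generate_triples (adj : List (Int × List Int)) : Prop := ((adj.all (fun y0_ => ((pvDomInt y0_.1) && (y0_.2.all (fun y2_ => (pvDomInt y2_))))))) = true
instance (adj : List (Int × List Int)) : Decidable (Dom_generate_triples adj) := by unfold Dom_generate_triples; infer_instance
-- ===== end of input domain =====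

-- B replaces A's three nested loops by a single while-loop draining an explicit
-- LIFO work stack of tagged tasks, with one final dedup (alternative decomposition).

-- ===== PORT A =====
def generate_triples (adj : List (Int × List Int)) : List (Int × Int × Int) :=
  let d : PySem.Dict Int (List Int) := ⟨adj⟩
  adj.foldl (fun s (p : Int × List Int) =>
    p.2.foldl (fun s v =>
      if d.contains v then
        (d.getD v []).foldl (fun s w => PySem.Set.add s (p.1, v, w)) s
      else s) s) []

-- ===== PORT B =====
-- the tagged work items of Source B's agenda: ("node", u) and ("edge", u, v)
inductive PvTask where
  | node : Int → PvTask
  | edge : Int → Int → PvTask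
deriving DecidableEq, Repr

-- number of "node" tasks on the stack (termination measure of the while loop)
def pvNodes (st : List PvTask) : Nat :=
  (st.filter (fun t => match t with | PvTask.node _ => true | _ => false)).length

theorem pvNodes_edges_append (u : Int) (vs : List Int) (rest : List PvTask) :
    pvNodes (vs.map (PvTask.edge u) ++ rest) = pvNodes rest := by
  induction vs with
  | nil => rfl
  | cons v vs ih => simp [pvNodes]

-- the while loop of Source B; the stack is represented TOP-FIRST (Python's list end
-- = Lean head), so 'stack.pop()' is a head match and 'stack.extend(reversed …)'
-- is prepending the list in order.
def pvRun (d : PySem.Dict Int (List Int)) :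
    List PvTask → List (Int × Int × Int) → List (Int × Int × Int)
  | [], out => out
  | PvTask.node u :: rest, out =>
      pvRun d ((d.getD u []).map (PvTask.edge u) ++ rest) out
  | PvTask.edge u v :: rest, out =>
      pvRun d rest
        (out ++ (if d.contains v then (d.getD v []).map (fun w => (u, v, w)) else []))
termination_by st _ => (pvNodes st, st.length)
decreasing_by
  · apply Prod.Lex.left
    rw [pvNodes_edges_append]
    simp [pvNodes]
  · apply Prod.Lex.right'
    · simp [pvNodes]
    · simp

def generate_triples_alt (adj : List (Int × List Int)) : List (Int × Int × Int) :=
  let d : PySem.Dict Int (List Int) := ⟨adj⟩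
  PySem.Set.ofList (pvRun d (d.keys.map PvTask.node) [])

-- ===== PRECONDITION & SPEC =====
-- Pre_ excludes association lists with duplicate keys: they do not represent any
-- Python dict (dict literals collapse duplicates before the call), so A never sees them.
def Pre_generate_triples (adj : List (Int × List Int)) : Prop := (adj.map Prod.fst).Nodup
instance (adj : List (Int × List Int)) : Decidable (Pre_generate_triples adj) := by unfold Pre_generate_triples; infer_instance
def pvWitness_generate_triples : (List (Int × List Int)) := [(1, [2, 1]), (2, [1])]

def Spec_generate_triples (adj : List (Int × List Int)) (out : List (Int × Int × Int)) : Prop := out = generate_triples_alt adj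
instance (adj : List (Int × List Int)) (out : List (Int × Int × Int)) : Decidable (Spec_generate_triples adj out) := by unfold Spec_generate_triples; infer_instance

-- ===== CLAIM (what is proved, stated in full; the proofs are below) =====
def Claim_equal_generate_triples : Prop := ∀ (adj : List (Int × List Int)), Dom_generate_triples adj → Pre_generate_triples adj → Spec_generate_triples adj (generate_triples adj)

-- ===== LEMMAS AND PROOFS =====

-- the block of triples generated for the edge (u, v)
def pvBlockD (d : PySem.Dict Int (List Int)) (u v : Int) : List (Int × Int × Int) :=
  if d.contains v then (d.getD v []).map (fun w => (u, v, w)) else []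

-- the flat u-major triple stream both ports dedup
def pvFlat (adj : List (Int × List Int)) : List (Int × Int × Int) :=
  adj.flatMap (fun p => p.2.flatMap (fun v => pvBlockD ⟨adj⟩ p.1 v))

theorem pv_inner_eq (adj : List (Int × List Int)) (u : Int) (nbrs : List Int)
    (s : PySem.Set (Int × Int × Int)) :
    nbrs.foldl (fun s v =>
      if (PySem.Dict.mk adj).contains v then
        ((PySem.Dict.mk adj).getD v []).foldl (fun s w => PySem.Set.add s (u, v, w)) s
      else s) s
    = PySem.Set.update s (nbrs.flatMap (fun v => pvBlockD ⟨adj⟩ u v)) := by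
  induction nbrs generalizing s with
  | nil => simp [PySem.Set.update]
  | cons v vs ih =>
      simp only [List.foldl_cons, List.flatMap_cons, PySem.Set.update_append, ih]
      congr 1
      by_cases h : (PySem.Dict.mk adj).contains v
      · simp only [pvBlockD, h, if_pos, ← PySem.Set.update_map_eq_foldl_add]
      · simp [pvBlockD, h, PySem.Set.update]

theorem pv_outer_eq (adj L : List (Int × List Int)) (s : PySem.Set (Int × Int × Int)) :
    L.foldl (fun s (p : Int × List Int) =>
      p.2.foldl (fun s v =>
        if (PySem.Dict.mk adj).contains v then
          ((PySem.Dict.mk adj).getD v []).foldl (fun s w => PySem.Set.add s (p.1, v, w)) s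
        else s) s) s
    = PySem.Set.update s (L.flatMap (fun p => p.2.flatMap (fun v => pvBlockD ⟨adj⟩ p.1 v))) := by
  induction L generalizing s with
  | nil => simp [PySem.Set.update]
  | cons p ps ih =>
      rw [List.foldl_cons, pv_inner_eq, ih, List.flatMap_cons, PySem.Set.update_append]

theorem pv_A_eq_ofList_flat (adj : List (Int × List Int)) :
    generate_triples adj = PySem.Set.ofList (pvFlat adj) := by
  show adj.foldl _ [] = _
  rw [pv_outer_eq adj adj []]
  rfl

-- draining a run of edge tasks appends their blocks to out
theorem pvRun_edges (d : PySem.Dict Int (List Int)) (u : Int) (vs : List Int)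
    (rest : List PvTask) (out : List (Int × Int × Int)) :
    pvRun d (vs.map (PvTask.edge u) ++ rest) out
    = pvRun d rest (out ++ vs.flatMap (fun v => pvBlockD d u v)) := by
  induction vs generalizing out with
  | nil => simp
  | cons v vs ih =>
      simp only [List.map_cons, List.cons_append, pvRun, List.flatMap_cons]
      rw [ih, List.append_assoc]
      rfl

-- draining a run of node tasks appends the whole stream
theorem pvRun_nodes (d : PySem.Dict Int (List Int)) (us : List Int)
    (out : List (Int × Int × Int)) :
    pvRun d (us.map PvTask.node) out
    = out ++ us.flatMap (fun u => (d.getD u []).flatMap (fun v => pvBlockD d u v)) := by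
  induction us generalizing out with
  | nil => simp [pvRun]
  | cons u us ih =>
      simp only [List.map_cons, pvRun, List.flatMap_cons]
      rw [pvRun_edges, ih, List.append_assoc]

theorem pv_getD_of_mem (adj : List (Int × List Int)) (h : (adj.map Prod.fst).Nodup)
    (p : Int × List Int) (hp : p ∈ adj) :
    (PySem.Dict.mk adj).getD p.1 [] = p.2 := by
  apply PySem.Dict.getD_of_mem_items (d := PySem.Dict.mk adj) (k := p.1) (v := p.2)
  · exact hp
  · simpa [PySem.Dict.keys] using h

theorem pv_B_eq_ofList_flat (adj : List (Int × List Int)) (h : (adj.map Prod.fst).Nodup) :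
    generate_triples_alt adj = PySem.Set.ofList (pvFlat adj) := by
  show PySem.Set.ofList (pvRun ⟨adj⟩ (((PySem.Dict.mk adj).keys).map PvTask.node) []) = _
  rw [pvRun_nodes, List.nil_append]
  congr 1
  have hkeys : (PySem.Dict.mk adj).keys = adj.map Prod.fst := rfl
  rw [hkeys, List.flatMap_map]
  unfold pvFlat
  apply List.flatMap_congr
  intro p hp
  rw [pv_getD_of_mem adj h p hp]

-- ===== VERDICT (by name: the statement is the Claim_ definition above) =====
theorem generate_triples_spec : Claim_equal_generate_triples := by
  intro adj _ hpre
  unfold Spec_generate_triples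
  rw [pv_A_eq_ofList_flat, pv_B_eq_ofList_flat adj hpre]
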